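-- pv_equiv track=rewrite | github.com/OPJMT/python_intro | les_7_errol/.venv/l7_vraag_4.py | get_excellent_student
-- ===== SOURCE A (Python) =====
-- def get_excellent_student(student):
--     uitmuntend_counter = 0
--     goed_counter = 0
--
--     for result in student["resultaten"].values():
--         if result == "onvoldoende":
--             continue
--         elif result == "uitmuntend":
--             uitmuntend_counter += 1
--             if uitmuntend_counter == 2:
--                 return student
--         elif result == "goed":
--             goed_counter += 1
--             if goed_counter == 4:
--                 return student
--         else:
--             continue
--
--     return None
-- ===== SOURCE B (Python) =====
-- def get_excellent_student(student):
--     results = list(student["resultaten"].values())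
--     if results.count("uitmuntend") >= 2 or results.count("goed") >= 4:
--         return student
--     return None
-- ===== Notes on version B (the rewrite author's own statement) =====
-- stated objective: idiomatic
-- what changed: Replaces A's stateful loop with two counters and early returns by a single count-then-decide test over the list of results.
import Mathlib
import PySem

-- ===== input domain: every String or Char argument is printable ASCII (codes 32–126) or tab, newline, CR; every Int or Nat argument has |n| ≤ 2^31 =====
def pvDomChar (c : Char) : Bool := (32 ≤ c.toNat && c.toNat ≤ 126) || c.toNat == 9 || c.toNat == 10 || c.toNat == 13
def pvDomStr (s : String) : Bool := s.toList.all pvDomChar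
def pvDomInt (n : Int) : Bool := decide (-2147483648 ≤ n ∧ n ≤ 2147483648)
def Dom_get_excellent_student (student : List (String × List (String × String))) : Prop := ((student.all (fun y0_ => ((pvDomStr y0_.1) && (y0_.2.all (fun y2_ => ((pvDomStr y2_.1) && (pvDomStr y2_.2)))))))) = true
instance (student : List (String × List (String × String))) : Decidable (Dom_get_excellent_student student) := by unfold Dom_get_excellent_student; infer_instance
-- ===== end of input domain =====

-- B counts all results once and applies the two thresholds in one test; A's early-return loop with two counters disappears.

-- ===== PORT A =====
-- the for-loop over the results with the two counters and the early returns
def pvLoopA (student : List (String × List (String × String))) :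
    List String → Nat → Nat → Option (List (String × List (String × String)))
  | [], _, _ => none
  | r :: rest, u, g =>
    if r == "onvoldoende" then pvLoopA student rest u g
    else if r == "uitmuntend" then
      (if u + 1 == 2 then some student else pvLoopA student rest (u + 1) g)
    else if r == "goed" then
      (if g + 1 == 4 then some student else pvLoopA student rest u (g + 1))
    else pvLoopA student rest u g

def get_excellent_student (student : List (String × List (String × String))) : Option (List (String × List (String × String))) :=
  match (PySem.Dict.mk student).get? "resultaten" with
  | none => none   -- Python raises KeyError here; excluded by Pre_
  | some res => pvLoopA student (PySem.Dict.values (PySem.Dict.mk res)) 0 0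

-- ===== PORT B =====
def get_excellent_student_alt (student : List (String × List (String × String))) : Option (List (String × List (String × String))) :=
  match (PySem.Dict.mk student).get? "resultaten" with
  | none => none   -- Python raises KeyError here; excluded by Pre_
  | some res =>
    let results := PySem.Dict.values (PySem.Dict.mk res)
    if 2 ≤ PySem.List.count results "uitmuntend" ∨ 4 ≤ PySem.List.count results "goed" then
      some student
    else none

-- ===== PRECONDITION & SPEC =====
-- Pre_ excludes only the inputs where A raises KeyError: no "resultaten" key.
def Pre_get_excellent_student (student : List (String × List (String × String))) : Prop :=
  ((PySem.Dict.mk student).get? "resultaten").isSome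
instance (student : List (String × List (String × String))) : Decidable (Pre_get_excellent_student student) := by unfold Pre_get_excellent_student; infer_instance

def pvWitness_get_excellent_student : (List (String × List (String × String))) :=
  [("resultaten", [("wiskunde", "goed"), ("taal", "uitmuntend")])]

def Spec_get_excellent_student (student : List (String × List (String × String))) (out : Option (List (String × List (String × String)))) : Prop := out = get_excellent_student_alt student
instance (student : List (String × List (String × String))) (out : Option (List (String × List (String × String)))) : Decidable (Spec_get_excellent_student student out) := by unfold Spec_get_excellent_student; infer_instance

-- ===== CLAIM (what is proved, stated in full; the proofs are below) =====
def Claim_equal_get_excellent_student : Prop := ∀ (student : List (String × List (String × String))), Dom_get_excellent_student student → Pre_get_excellent_student student → Spec_get_excellent_student student (get_excellent_student student)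

-- ===== LEMMAS AND PROOFS =====

-- invariant of A's loop: with counters u < 2, g < 4 still short of the thresholds,
-- the loop returns the student iff the remaining results push one counter over its threshold
theorem pvLoopA_eq_count (student : List (String × List (String × String)))
    (rs : List String) (u g : Nat) (hu : u < 2) (hg : g < 4) :
    pvLoopA student rs u g =
      if 2 ≤ u + rs.count "uitmuntend" ∨ 4 ≤ g + rs.count "goed" then some student else none := by
  induction rs generalizing u g with
  | nil =>
    simp only [pvLoopA, List.count_nil]
    split <;> [omega; rfl]
  | cons r rest ih =>
    simp only [pvLoopA]
    by_cases h1 : r = "uitmuntend"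
    · subst h1
      simp only [List.count_cons_self]
      have : ("uitmuntend" == "onvoldoende") = false := by decide
      rw [this]
      simp only [Bool.false_eq_true, if_false, BEq.rfl, if_true]
      have hcnt : (List.count "goed" ("uitmuntend" :: rest)) = List.count "goed" rest := by
        rw [List.count_cons_of_ne]; decide
      by_cases h2 : u + 1 = 2
      · have : (u + 1 == 2) = true := by simp [h2]
        rw [this]; simp only [if_true]
        rw [if_pos]; left; omega
      · have : (u + 1 == 2) = false := by simp; omega
        rw [this]; simp only [Bool.false_eq_true, if_false]
        rw [ih (u + 1) g (by omega) hg, hcnt]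
        have e : u + 1 + List.count "uitmuntend" rest = u + (List.count "uitmuntend" rest + 1) := by omega
        rw [e]
    · by_cases h3 : r = "goed"
      · subst h3
        have e1 : ("goed" == "onvoldoende") = false := by decide
        have e2 : ("goed" == "uitmuntend") = false := by decide
        rw [e1, e2]
        simp only [Bool.false_eq_true, if_false, BEq.rfl, if_true]
        have c1 : List.count "uitmuntend" ("goed" :: rest) = List.count "uitmuntend" rest := by
          rw [List.count_cons_of_ne]; decide
        have c2 : List.count "goed" ("goed" :: rest) = List.count "goed" rest + 1 :=
          List.count_cons_self
        rw [c1, c2]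
        by_cases h2 : g + 1 = 4
        · have : (g + 1 == 4) = true := by simp [h2]
          rw [this]; simp only [if_true]
          rw [if_pos]; right; omega
        · have : (g + 1 == 4) = false := by simp; omega
          rw [this]; simp only [Bool.false_eq_true, if_false]
          rw [ih u (g + 1) hu (by omega)]
          have e : g + 1 + List.count "goed" rest = g + (List.count "goed" rest + 1) := by omega
          rw [e]
      · -- r is neither "uitmuntend" nor "goed": both counts unchanged, loop skips
        have c1 : List.count "uitmuntend" (r :: rest) = List.count "uitmuntend" rest := by
          rw [List.count_cons_of_ne (by simpa [eq_comm] using h1)]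
        have c2 : List.count "goed" (r :: rest) = List.count "goed" rest := by
          rw [List.count_cons_of_ne (by simpa [eq_comm] using h3)]
        rw [c1, c2]
        by_cases h0 : r = "onvoldoende"
        · have : (r == "onvoldoende") = true := by simp [h0]
          rw [this]; simp only [if_true]; exact ih u g hu hg
        · have e0 : (r == "onvoldoende") = false := by simp [h0]
          have e1 : (r == "uitmuntend") = false := by simp [h1]
          have e2 : (r == "goed") = false := by simp [h3]
          rw [e0, e1, e2]
          simp only [Bool.false_eq_true, if_false]
          exact ih u g hu hg

-- ===== VERDICT (by name: the statement is the Claim_ definition above) =====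
theorem get_excellent_student_spec : Claim_equal_get_excellent_student := by
  intro student _ _
  unfold Spec_get_excellent_student get_excellent_student get_excellent_student_alt
  cases h : (PySem.Dict.mk student).get? "resultaten" with
  | none => rfl
  | some res =>
    simp only
    rw [pvLoopA_eq_count student _ 0 0 (by omega) (by omega)]
    simp [PySem.List.count]
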